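-- pv_equiv track=rewrite | github.com/alancast/LeetCodeProblems | python/hard/3510_min_pair_sort_removal_2.py | minimumPairRemoval_naive
-- ===== SOURCE A (Python) =====
-- from typing import List
--
-- def minimumPairRemoval_naive(nums: List[int]) -> int:
--     n = len(nums)
--     pairs_removed = 0
--
--     sorted = False
--     # Keep doing operation until sorted
--     while not sorted:
--         sorted = True
--         min_sum_index = 0
--         min_sum = float('inf')
--
--         # Go over array to find min sum and see if sorted
--         for i in range(1, n - pairs_removed):
--             if nums[i-1] > nums[i]:
--                 sorted = False
--
--             if nums[i-1] + nums[i] < min_sum: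
--                 min_sum_index = i-1
--                 min_sum = nums[i-1] + nums[i]
--
--         # See if we need to remove a pair and then do it
--         if not sorted:
--             nums[min_sum_index] = nums[min_sum_index] + nums[min_sum_index + 1]
--             nums.pop(min_sum_index + 1)
--             pairs_removed += 1
--
--     return pairs_removed
-- ===== SOURCE B (Python) =====
-- from typing import List
-- import heapq
--
-- def minimumPairRemoval_naive(nums: List[int]) -> int:
--     # Heap of adjacent-pair sums + doubly linked list + lazy deletion,
--     # with an incrementally maintained count of descents (no per-step rescan).
--     n = len(nums)
--     vals = list(nums)
--     nxt = [i + 1 if i + 1 < n else None for i in range(n)]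
--     prv = [i - 1 if i > 0 else None for i in range(n)]
--     alive = [True] * n
--     heap = [(vals[i] + vals[i + 1], i, i + 1) for i in range(n - 1)]
--     heapq.heapify(heap)
--     bad = sum(1 for i in range(n - 1) if vals[i] > vals[i + 1])
--     count = 0
--     while bad > 0:
--         s, i, j = heapq.heappop(heap)
--         # lazy deletion: skip entries that no longer describe a current pair
--         if not (alive[i] and nxt[i] == j and s == vals[i] + vals[j]):
--             continue
--         p, k = prv[i], nxt[j]
--         bad -= (vals[i] > vals[j])
--         if p is not None:
--             bad -= (vals[p] > vals[i])
--         if k is not None: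
--             bad -= (vals[j] > vals[k])
--         vals[i] = s
--         alive[j] = False
--         nxt[i] = k
--         if k is not None:
--             prv[k] = i
--         if p is not None:
--             bad += (vals[p] > s)
--             heapq.heappush(heap, (vals[p] + s, p, i))
--         if k is not None:
--             bad += (s > vals[k])
--             heapq.heappush(heap, (s + vals[k], i, k))
--         count += 1
--     return count
-- ===== Notes on version B (the rewrite author's own statement) =====
-- stated objective: faster
-- what changed: B replaces A's per-step full rescan (find min adjacent sum and check sortedness each pass) by a heap of (sum,left,right) entries with lazy deletion, a doubly linked list over the array for O(1) merges, and an incrementally maintained descent counter.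
import Mathlib
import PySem

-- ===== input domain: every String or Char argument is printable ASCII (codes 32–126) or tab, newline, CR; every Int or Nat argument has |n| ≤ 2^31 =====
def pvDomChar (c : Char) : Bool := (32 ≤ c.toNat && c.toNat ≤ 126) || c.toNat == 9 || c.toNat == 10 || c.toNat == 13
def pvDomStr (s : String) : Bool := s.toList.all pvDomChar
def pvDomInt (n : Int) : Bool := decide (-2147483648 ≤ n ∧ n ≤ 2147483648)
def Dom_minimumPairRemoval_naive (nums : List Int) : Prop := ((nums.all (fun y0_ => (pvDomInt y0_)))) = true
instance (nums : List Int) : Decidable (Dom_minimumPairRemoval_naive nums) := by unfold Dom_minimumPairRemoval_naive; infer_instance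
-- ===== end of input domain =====

-- B replaces A's O(n^2) per-step rescan by a heap of adjacent-pair sums with lazy deletion, a doubly
-- linked list for O(1) merges, and an incremental descent counter (O(n log n), measurably faster).
-- A mutates its argument list in place; B does not: the equivalence proved is about the RETURN value.

-- ===== PORT A =====
-- step of A's inner `for i in range(1, n - pairs_removed)` loop;
-- state = (sorted, min_sum_index, min_sum) with `none` playing float('inf')
def pvStepA (xs : List Int) (st : Bool × Nat × Option Int) (i : Nat) : Bool × Nat × Option Int :=
  let a := xs.getD (i - 1) 0   -- nums[i-1]; indices are in range in A
  let b := xs.getD i 0         -- nums[i]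
  let srt := if a > b then false else st.1
  match st.2.2 with
  | none => (srt, i - 1, some (a + b))
  | some m => if a + b < m then (srt, i - 1, some (a + b)) else (srt, st.2.1, some m)

-- A's `while not sorted` loop; fuel is only a totality guard (length+1 always suffices:
-- each merge shortens the list by one).  n - pairs_removed in A is the current length of nums.
def pvLoopA : Nat → List Int → Int → Int
  | 0, _, acc => acc
  | fuel + 1, xs, acc =>
    let st := (List.range' 1 (xs.length - 1)).foldl (pvStepA xs) (true, 0, none)
    if st.1 then acc
    else
      let mi := st.2.1
      let v := xs.getD mi 0 + xs.getD (mi + 1) 0   -- nums[i] = nums[i] + nums[i+1]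
      pvLoopA fuel ((xs.set mi v).eraseIdx (mi + 1)) (acc + 1)   -- nums.pop(i+1)

def minimumPairRemoval_naive (nums : List Int) : Int := pvLoopA (nums.length + 1) nums 0

-- ===== PORT B =====
-- lexicographic ≤ on heap entries (Python's tuple comparison on (sum, i, j))
def pvEntLe (a b : Int × Nat × Nat) : Bool :=
  decide (a.1 < b.1) || (a.1 == b.1 && (decide (a.2.1 < b.2.1) || (a.2.1 == b.2.1 && decide (a.2.2 ≤ b.2.2))))

-- the heap is modelled as a list kept sorted by pvEntLe: heappush = ordered insert, heappop = head;
-- exact, because Python's heap is observed only through popping the minimum of a set of int tuples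
def pvInsort (e : Int × Nat × Nat) : List (Int × Nat × Nat) → List (Int × Nat × Nat)
  | [] => [e]
  | x :: t => if pvEntLe x e then x :: pvInsort e t else e :: x :: t

-- B's `while bad > 0` loop; fuel is only a totality guard (every iteration pops one heap entry and
-- at most 3*n+3 entries are ever pushed)
def pvLoopH : Nat → List Int → List (Option Nat) → List (Option Nat) → List Bool →
    List (Int × Nat × Nat) → Int → Int → Int
  | 0, _, _, _, _, _, _, count => count
  | fuel + 1, vals, nxt, prv, alive, heap, bad, count =>
    if bad ≤ 0 then count else
    match heap with
    | [] => count   -- unreachable: while bad > 0 the heap holds an entry for every current pair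
    | (s, i, j) :: rest =>
      -- lazy deletion: skip entries that no longer describe a current pair
      if alive.getD i false && (nxt.getD i none == some j) && (s == vals.getD i 0 + vals.getD j 0) then
        let p := prv.getD i none
        let k := nxt.getD j none
        let bad1 := bad - (if vals.getD i 0 > vals.getD j 0 then 1 else 0)
        let bad2 := match p with
          | some p' => bad1 - (if vals.getD p' 0 > vals.getD i 0 then 1 else 0)
          | none => bad1
        let bad3 := match k with
          | some k' => bad2 - (if vals.getD j 0 > vals.getD k' 0 then 1 else 0)
          | none => bad2
        let vals' := vals.set i s
        let alive' := alive.set j false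
        let nxt' := nxt.set i k
        let prv' := match k with | some k' => prv.set k' (some i) | none => prv
        let bh1 : Int × List (Int × Nat × Nat) := match p with
          | some p' => (bad3 + (if vals'.getD p' 0 > s then 1 else 0),
                        pvInsort (vals'.getD p' 0 + s, p', i) rest)
          | none => (bad3, rest)
        let bh2 : Int × List (Int × Nat × Nat) := match k with
          | some k' => (bh1.1 + (if s > vals'.getD k' 0 then 1 else 0),
                        pvInsort (s + vals'.getD k' 0, i, k') bh1.2)
          | none => bh1
        pvLoopH fuel vals' nxt' prv' alive' bh2.2 bh2.1 (count + 1)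
      else pvLoopH fuel vals nxt prv alive rest bad count

def minimumPairRemoval_naive_alt (nums : List Int) : Int :=
  let n := nums.length
  let nxt := (List.range n).map (fun i => if i + 1 < n then some (i + 1) else none)
  let prv := (List.range n).map (fun i => if i = 0 then none else some (i - 1))
  let alive := List.replicate n true
  let entries := (List.range (n - 1)).map
    (fun i => ((nums.getD i 0 + nums.getD (i + 1) 0, i, i + 1) : Int × Nat × Nat))
  let heap := entries.foldl (fun h e => pvInsort e h) []   -- heapq.heapify
  let bad : Int := ((List.range (n - 1)).filter (fun i => nums.getD i 0 > nums.getD (i + 1) 0)).length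
  pvLoopH (3 * n + 3) nums nxt prv alive heap bad 0

-- ===== PRECONDITION & SPEC =====
def Spec_minimumPairRemoval_naive (nums : List Int) (out : Int) : Prop := out = minimumPairRemoval_naive_alt nums
instance (nums : List Int) (out : Int) : Decidable (Spec_minimumPairRemoval_naive nums out) := by unfold Spec_minimumPairRemoval_naive; infer_instance

-- ===== CLAIM (what is proved, stated in full; the proofs are below) =====
def Claim_equal_minimumPairRemoval_naive : Prop := ∀ (nums : List Int), Dom_minimumPairRemoval_naive nums → Spec_minimumPairRemoval_naive nums (minimumPairRemoval_naive nums)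

-- ===== LEMMAS AND PROOFS =====

-- ---------- generic list helpers ----------

def pairsL {α : Type} (xs : List α) : List (α × α) := xs.zip (xs.drop 1)

def lastO {α : Type} : List α → Option α → Option α
  | [], pr => pr
  | a :: t, _ => lastO t (some a)

def glueL {α : Type} (u v : List α) : List (α × α) :=
  match lastO u none, v.head? with
  | some a, some b => [(a, b)]
  | _, _ => []

def dCount (xs : List Int) : Nat := (pairsL xs).countP (fun p => decide (p.1 > p.2))

lemma pairsL_nil {α : Type} : pairsL ([] : List α) = [] := rfl

lemma pairsL_cons {α : Type} (a : α) (v : List α) :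
    pairsL (a :: v) = (match v.head? with | some b => [(a, b)] | none => []) ++ pairsL v := by
  cases v <;> simp [pairsL]

lemma lastO_cons {α : Type} (a : α) (u : List α) (pr : Option α) :
    lastO (a :: u) pr = lastO u (some a) := rfl

lemma lastO_mem_or {α : Type} : ∀ (u : List α) (pr : Option α) (x : α),
    lastO u pr = some x → x ∈ u ∨ pr = some x := by
  intro u
  induction u with
  | nil => intro pr x h; exact Or.inr h
  | cons a t ih =>
    intro pr x h
    rcases ih (some a) x h with h1 | h1
    · exact Or.inl (List.mem_cons_of_mem _ h1)
    · simp at h1; subst h1; exact Or.inl (List.mem_cons_self)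

lemma lastO_map {α β : Type} (f : α → β) : ∀ (u : List α) (pr : Option α),
    lastO (u.map f) (pr.map f) = (lastO u pr).map f := by
  intro u
  induction u with
  | nil => intro pr; rfl
  | cons a t ih => intro pr; simpa [lastO_cons] using ih (some a)

lemma pairsL_append {α : Type} : ∀ (u v : List α),
    pairsL (u ++ v) = pairsL u ++ glueL u v ++ pairsL v := by
  intro u
  induction u with
  | nil => intro v; simp [pairsL, glueL, lastO]
  | cons a t ih =>
    intro v
    cases t with
    | nil =>
      cases v with
      | nil => simp [pairsL, glueL, lastO]
      | cons b w => simp [pairsL_cons, pairsL_nil, glueL, lastO]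
    | cons b t' =>
      have h1 : pairsL ((a :: b :: t') ++ v) = (a, b) :: pairsL ((b :: t') ++ v) := by
        simp [pairsL]
      have h2 : pairsL (a :: b :: t') = (a, b) :: pairsL (b :: t') := by
        simp [pairsL]
      rw [h1, ih v, h2]
      simp [glueL, lastO_cons]

lemma length_pairsL {α : Type} (xs : List α) : (pairsL xs).length = xs.length - 1 := by
  simp [pairsL]

lemma getElem_pairsL {α : Type} (xs : List α) (u : Nat) (h : u < (pairsL xs).length) :
    (pairsL xs)[u] = (xs[u]'(by have := length_pairsL xs; omega),
                      xs[u + 1]'(by have := length_pairsL xs; omega)) := by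
  simp [pairsL]

lemma pairsL_map {α β : Type} (f : α → β) (xs : List α) :
    pairsL (xs.map f) = (pairsL xs).map (fun pq => (f pq.1, f pq.2)) := by
  show (xs.map f).zip ((xs.map f).drop 1) = _
  rw [show ((xs.map f).drop 1) = ((xs.drop 1).map f) by rw [List.map_drop], List.zip_map]
  rfl

lemma mem_pairsL {α : Type} (xs : List α) (pq : α × α) (h : pq ∈ pairsL xs) :
    pq.1 ∈ xs ∧ pq.2 ∈ xs := by
  have h1 := List.of_mem_zip h
  refine ⟨h1.1, List.mem_of_mem_drop h1.2⟩

lemma dCount_append (u v : List Int) :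
    dCount (u ++ v) = dCount u + (glueL u v).countP (fun p => decide (p.1 > p.2)) + dCount v := by
  simp [dCount, pairsL_append, List.countP_append]; ring

lemma countP_glue (U V : List Int) :
    (glueL U V).countP (fun p => decide (p.1 > p.2))
      = (match lastO U none, V.head? with
         | some x, some y => if x > y then 1 else 0
         | _, _ => 0) := by
  unfold glueL
  cases h1 : lastO U none <;> cases h2 : V.head? <;> simp

lemma dCount_cons (a : Int) (l : List Int) :
    dCount (a :: l)
      = (match l.head? with | some y => if a > y then 1 else 0 | none => 0) + dCount l := by
  cases l with
  | nil => simp [dCount, pairsL]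
  | cons b t =>
    have h : pairsL (a :: b :: t) = (a, b) :: pairsL (b :: t) := by simp [pairsL]
    rw [dCount, h, List.countP_cons]
    simp [dCount]
    omega

lemma dCount_mid (U W : List Int) (a b : Int) :
    dCount (U ++ a :: b :: W)
      = dCount U + dCount W
        + (if a > b then 1 else 0)
        + (match lastO U none with | some x => if x > a then 1 else 0 | none => 0)
        + (match W.head? with | some y => if b > y then 1 else 0 | none => 0) := by
  rw [dCount_append, countP_glue, dCount_cons, dCount_cons]
  cases h1 : lastO U none <;> cases h2 : W.head? <;> simp <;> omega

lemma dCount_mid1 (U W : List Int) (a : Int) :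
    dCount (U ++ a :: W)
      = dCount U + dCount W
        + (match lastO U none with | some x => if x > a then 1 else 0 | none => 0)
        + (match W.head? with | some y => if a > y then 1 else 0 | none => 0) := by
  rw [dCount_append, countP_glue, dCount_cons]
  cases h1 : lastO U none <;> cases h2 : W.head? <;> simp <;> omega

-- ---------- getD/set helpers ----------

lemma getD_set_ne {α : Type} (l : List α) (d : α) (i a : Nat) (x : α) (h : a ≠ i) :
    (l.set i x).getD a d = l.getD a d := by
  simp [List.getD_eq_getElem?_getD, List.getElem?_set_ne (by omega : i ≠ a)]

lemma getD_set_self {α : Type} (l : List α) (d : α) (i : Nat) (x : α) (h : i < l.length) :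
    (l.set i x).getD i d = x := by
  simp [List.getD_eq_getElem?_getD, List.getElem?_set_self, h]

-- ---------- pvEntLe / pvInsort ----------

lemma pvEntLe_refl (a : Int × Nat × Nat) : pvEntLe a a = true := by
  simp [pvEntLe]

lemma pvEntLe_total (a b : Int × Nat × Nat) : pvEntLe a b = true ∨ pvEntLe b a = true := by
  simp [pvEntLe]; omega

lemma pvEntLe_trans (a b c : Int × Nat × Nat)
    (h1 : pvEntLe a b = true) (h2 : pvEntLe b c = true) : pvEntLe a c = true := by
  simp [pvEntLe] at h1 h2 ⊢; omega

lemma mem_insort (e x : Int × Nat × Nat) : ∀ (h : List (Int × Nat × Nat)),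
    (x ∈ pvInsort e h ↔ x = e ∨ x ∈ h) := by
  intro h
  induction h with
  | nil => simp [pvInsort]
  | cons y t ih =>
    by_cases hc : pvEntLe y e = true <;> simp [pvInsort, hc, ih] <;> tauto

lemma length_insort (e : Int × Nat × Nat) : ∀ (h : List (Int × Nat × Nat)),
    (pvInsort e h).length = h.length + 1 := by
  intro h
  induction h with
  | nil => rfl
  | cons y t ih => by_cases hc : pvEntLe y e = true <;> simp [pvInsort, hc, ih]

lemma pairwise_insort (e : Int × Nat × Nat) : ∀ (h : List (Int × Nat × Nat)),
    h.Pairwise (fun a b => pvEntLe a b = true) →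
    (pvInsort e h).Pairwise (fun a b => pvEntLe a b = true) := by
  intro h
  induction h with
  | nil => intro _; simp [pvInsort, List.pairwise_singleton]
  | cons y t ih =>
    intro hp
    rw [List.pairwise_cons] at hp
    by_cases hc : pvEntLe y e = true
    · simp only [pvInsort, hc, if_pos]
      rw [List.pairwise_cons]
      refine ⟨?_, ih hp.2⟩
      intro z hz
      rcases (mem_insort e z t).mp hz with rfl | hz'
      · exact hc
      · exact hp.1 z hz'
    · simp only [pvInsort, hc, if_neg, Bool.not_eq_true]
      rw [List.pairwise_cons]
      have hey : pvEntLe e y = true := by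
        rcases pvEntLe_total y e with h1 | h1
        · exact absurd h1 hc
        · exact h1
      refine ⟨?_, List.pairwise_cons.mpr hp⟩
      intro z hz
      rcases List.mem_cons.mp hz with rfl | hz'
      · exact hey
      · exact pvEntLe_trans e y z hey (hp.1 z hz')

lemma foldl_insort_mem (x : Int × Nat × Nat) : ∀ (l : List (Int × Nat × Nat)) (acc : List (Int × Nat × Nat)),
    (x ∈ l.foldl (fun h e => pvInsort e h) acc ↔ x ∈ acc ∨ x ∈ l) := by
  intro l
  induction l with
  | nil => simp
  | cons e t ih =>
    intro acc
    rw [List.foldl_cons, ih, mem_insort]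
    simp; tauto

lemma foldl_insort_pairwise : ∀ (l : List (Int × Nat × Nat)) (acc : List (Int × Nat × Nat)),
    acc.Pairwise (fun a b => pvEntLe a b = true) →
    (l.foldl (fun h e => pvInsort e h) acc).Pairwise (fun a b => pvEntLe a b = true) := by
  intro l
  induction l with
  | nil => intro acc h; exact h
  | cons e t ih => intro acc h; exact ih _ (pairwise_insort e acc h)

lemma foldl_insort_length : ∀ (l : List (Int × Nat × Nat)) (acc : List (Int × Nat × Nat)),
    (l.foldl (fun h e => pvInsort e h) acc).length = acc.length + l.length := by
  intro l
  induction l with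
  | nil => intro acc; simp
  | cons e t ih => intro acc; simp [List.foldl_cons, ih, length_insort]; omega

-- ---------- linked-list invariants ----------

def linkN (nxt : List (Option Nat)) : List Nat → Option Nat → Prop
  | [], _ => True
  | a :: t, stop =>
      nxt.getD a none = (match t with | [] => stop | b :: _ => some b) ∧ linkN nxt t stop

def linkP (prv : List (Option Nat)) : Option Nat → List Nat → Prop
  | _, [] => True
  | pr, a :: t => prv.getD a none = pr ∧ linkP prv (some a) t

lemma linkN_append (nxt : List (Option Nat)) : ∀ (u v : List Nat) (stop : Option Nat),
    linkN nxt (u ++ v) stop ↔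
      (linkN nxt u (match v with | [] => stop | b :: _ => some b) ∧ linkN nxt v stop) := by
  intro u
  induction u with
  | nil => intro v stop; simp [linkN]
  | cons a t ih =>
    intro v stop
    constructor
    · rintro ⟨h1, h2⟩
      rcases (ih v stop).mp h2 with ⟨h3, h4⟩
      refine ⟨⟨?_, h3⟩, h4⟩
      cases t with
      | nil => cases v <;> exact h1
      | cons b t' => exact h1
    · rintro ⟨⟨h1, h3⟩, h4⟩
      refine ⟨?_, (ih v stop).mpr ⟨h3, h4⟩⟩
      cases t with
      | nil => cases v <;> exact h1
      | cons b t' => exact h1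

lemma linkP_append (prv : List (Option Nat)) : ∀ (u v : List Nat) (pr : Option Nat),
    linkP prv pr (u ++ v) ↔ (linkP prv pr u ∧ linkP prv (lastO u pr) v) := by
  intro u
  induction u with
  | nil => intro v pr; simp [linkP, lastO]
  | cons a t ih =>
    intro v pr
    simp only [List.cons_append, linkP, lastO_cons]
    rw [ih v (some a)]
    tauto

lemma linkN_congr (nxt nxt' : List (Option Nat)) : ∀ (u : List Nat) (stop : Option Nat),
    (∀ a ∈ u, nxt'.getD a none = nxt.getD a none) →
    linkN nxt u stop → linkN nxt' u stop := by
  intro u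
  induction u with
  | nil => intro stop _ _; trivial
  | cons a t ih =>
    intro stop hco h
    exact ⟨by rw [hco a List.mem_cons_self]; exact h.1,
           ih stop (fun b hb => hco b (List.mem_cons_of_mem _ hb)) h.2⟩

lemma linkP_congr (prv prv' : List (Option Nat)) : ∀ (u : List Nat) (pr : Option Nat),
    (∀ a ∈ u, prv'.getD a none = prv.getD a none) →
    linkP prv pr u → linkP prv' pr u := by
  intro u
  induction u with
  | nil => intro pr _ _; trivial
  | cons a t ih =>
    intro pr hco h
    exact ⟨by rw [hco a List.mem_cons_self]; exact h.1,
           ih (some a) (fun b hb => hco b (List.mem_cons_of_mem _ hb)) h.2⟩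

lemma linkN_pairs (nxt : List (Option Nat)) : ∀ (c : List Nat) (pq : Nat × Nat),
    linkN nxt c none → pq ∈ pairsL c → nxt.getD pq.1 none = some pq.2 := by
  intro c
  induction c with
  | nil => intro pq _ hm; simp [pairsL] at hm
  | cons a t ih =>
    intro pq hl hm
    cases t with
    | nil => simp [pairsL] at hm
    | cons b t' =>
      have hm' : pq = (a, b) ∨ pq ∈ pairsL (b :: t') := by
        have : pairsL (a :: b :: t') = (a, b) :: pairsL (b :: t') := by simp [pairsL]
        rw [this] at hm; simpa using hm
      rcases hm' with rfl | hm'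
      · exact hl.1
      · exact ih pq hl.2 hm'

-- ---------- the invariant ----------

structure PvInv (vals : List Int) (nxt prv : List (Option Nat)) (alive : List Bool)
    (heap : List (Int × Nat × Nat)) (bad : Int) (c : List Nat) : Prop where
  pw : c.Pairwise (· < ·)
  bnd : ∀ x ∈ c, x < alive.length
  lnx : nxt.length = alive.length
  lpr : prv.length = alive.length
  lvl : vals.length = alive.length
  alv : ∀ i, i < alive.length → (alive.getD i false = true ↔ i ∈ c)
  lkn : linkN nxt c none
  lkp : linkP prv none c
  bd  : bad = (dCount (c.map (fun x => vals.getD x 0)) : Int)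
  srt : heap.Pairwise (fun a b => pvEntLe a b = true)
  mem : ∀ pq ∈ pairsL c,
    ((vals.getD pq.1 0 + vals.getD pq.2 0, pq.1, pq.2) : Int × Nat × Nat) ∈ heap


-- ---------- A-side characterisation (scan = sortedness flag + leftmost minimal pair) ----------

def pvEnumFrom {α : Type} : Nat → List α → List (Nat × α)
  | _, [] => []
  | k, x :: t => (k, x) :: pvEnumFrom (k + 1) t

-- reference: leftmost minimal adjacent sum (with its index), head-recursive
def pvBestRef : Nat → List (Int × Int) → Option (Nat × Int)
  | _, [] => none
  | k, (a, b) :: t =>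
    match pvBestRef (k + 1) t with
    | none => some (k, a + b)
    | some (j, s) => if a + b ≤ s then some (k, a + b) else some (j, s)

-- A's step re-expressed on an (index, pair) item
def pvStepA' (st : Bool × Nat × Option Int) (p : Nat × (Int × Int)) : Bool × Nat × Option Int :=
  let a := p.2.1
  let b := p.2.2
  let srt := if a > b then false else st.1
  match st.2.2 with
  | none => (srt, p.1, some (a + b))
  | some m => if a + b < m then (srt, p.1, some (a + b)) else (srt, st.2.1, some m)

lemma pv_zip_length (xs : List Int) : (xs.zip (xs.drop 1)).length = xs.length - 1 := by
  simp [List.length_zip]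

lemma pv_zip_get (xs : List Int) (k : Nat) (hk : k < (xs.zip (xs.drop 1)).length) :
    (xs.zip (xs.drop 1))[k] = (xs[k]'(by simp at hk; omega),
                               xs[k+1]'(by simp at hk; omega)) := by
  simp

lemma pv_bridge (xs : List Int) : ∀ (m k : Nat) (st : Bool × Nat × Option Int),
    k + m = (xs.zip (xs.drop 1)).length →
    (List.range' (k + 1) m).foldl (pvStepA xs) st
      = (pvEnumFrom k ((xs.zip (xs.drop 1)).drop k)).foldl pvStepA' st := by
  intro m
  induction m with
  | zero =>
    intro k st hk
    have : (xs.zip (xs.drop 1)).drop k = [] := by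
      apply List.drop_eq_nil_of_le; omega
    rw [this]
    simp [pvEnumFrom]
  | succ n ih =>
    intro k st hk
    have hklt : k < (xs.zip (xs.drop 1)).length := by omega
    have hdrop : (xs.zip (xs.drop 1)).drop k
        = (xs.zip (xs.drop 1))[k] :: (xs.zip (xs.drop 1)).drop (k + 1) :=
      List.drop_eq_getElem_cons hklt
    have hrange : List.range' (k + 1) (n + 1) = (k + 1) :: List.range' (k + 2) n := by
      simp [List.range'_succ]
    rw [hdrop, hrange]
    simp only [pvEnumFrom, List.foldl_cons]
    rw [← ih (k + 1) _ (by omega)]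
    congr 1
    have hx1 : k < xs.length := by simp at hklt ⊢; omega
    have hx2 : k + 1 < xs.length := by simp at hklt ⊢; omega
    rw [pv_zip_get xs k hklt]
    simp [pvStepA, pvStepA', List.getElem?_eq_getElem hx1, List.getElem?_eq_getElem hx2]

lemma pv_lemA_some : ∀ (ps : List (Int × Int)) (k : Nat) (srt : Bool) (mi : Nat) (m : Int),
    (pvEnumFrom k ps).foldl pvStepA' (srt, mi, some m)
      = (srt && !(ps.any fun p => decide (p.1 > p.2)),
         match pvBestRef k ps with
         | none => (mi, some m)
         | some (j, s) => if s < m then (j, some s) else (mi, some m)) := by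
  intro ps
  induction ps with
  | nil => intro k srt mi m; simp [pvEnumFrom, pvBestRef]
  | cons p t ih =>
    intro k srt mi m
    obtain ⟨a, b⟩ := p
    simp only [pvEnumFrom, List.foldl_cons, pvStepA']
    by_cases hab : a > b <;> by_cases hlt : a + b < m <;>
      · simp only [hab, hlt, if_pos, if_neg, not_false_iff]
        rw [ih]
        simp only [pvBestRef]
        cases hb : pvBestRef (k + 1) t with
        | none => simp [hab, hlt, List.any_cons]
        | some js =>
          obtain ⟨j, s⟩ := js
          by_cases hs : a + b ≤ s <;>
            by_cases hsm : s < m <;>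
              by_cases hsab : s < a + b <;>
                simp [hab, hlt, hs, hsm, hsab, List.any_cons] <;> omega

lemma pv_lemA_none : ∀ (ps : List (Int × Int)) (k : Nat) (srt : Bool) (mi : Nat),
    (pvEnumFrom k ps).foldl pvStepA' (srt, mi, (none : Option Int))
      = (srt && !(ps.any fun p => decide (p.1 > p.2)),
         match pvBestRef k ps with
         | none => (mi, (none : Option Int))
         | some (j, s) => (j, some s)) := by
  intro ps
  cases ps with
  | nil => intro k srt mi; simp [pvEnumFrom, pvBestRef]
  | cons p t =>
    intro k srt mi
    obtain ⟨a, b⟩ := p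
    simp only [pvEnumFrom, List.foldl_cons, pvStepA']
    rw [pv_lemA_some]
    simp only [pvBestRef]
    cases hb : pvBestRef (k + 1) t with
    | none => by_cases hab : a > b <;> simp [hab, List.any_cons]
    | some js =>
      obtain ⟨j, s⟩ := js
      by_cases hab : a > b <;> by_cases hs : a + b ≤ s <;>
        by_cases hsab : s < a + b <;>
          simp [hab, hs, hsab, List.any_cons] <;> omega

lemma pv_bestRef_spec : ∀ (ps : List (Int × Int)) (k j : Nat) (s : Int),
    pvBestRef k ps = some (j, s) →
    k ≤ j ∧ ∃ h : j - k < ps.length, s = (ps[j - k]'h).1 + (ps[j - k]'h).2 := by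
  intro ps
  induction ps with
  | nil => intro k j s h; simp [pvBestRef] at h
  | cons p t ih =>
    intro k j s h
    obtain ⟨a, b⟩ := p
    simp only [pvBestRef] at h
    cases hb : pvBestRef (k + 1) t with
    | none =>
      rw [hb] at h
      simp at h
      obtain ⟨hj, hs⟩ := h
      subst hj; subst hs
      exact ⟨le_refl _, by simp⟩
    | some js =>
      obtain ⟨j', s'⟩ := js
      rw [hb] at h
      by_cases hle : a + b ≤ s'
      · simp [hle] at h
        obtain ⟨hj, hs⟩ := h
        subst hj; subst hs
        exact ⟨le_refl _, by simp⟩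
      · simp [hle] at h
        obtain ⟨hj, hs⟩ := h
        subst hj; subst hs
        obtain ⟨hk1, hlt, hval⟩ := ih (k + 1) j' s' hb
        refine ⟨by omega, by simp; omega, ?_⟩
        have hidx : j' - k = (j' - (k + 1)) + 1 := by omega
        simp [hidx]
        exact hval

lemma pv_merge_eq : ∀ (xs : List Int) (j : Nat) (v : Int), j + 1 < xs.length →
    (xs.set j v).eraseIdx (j + 1) = xs.take j ++ [v] ++ xs.drop (j + 2) := by
  intro xs
  induction xs with
  | nil => intro j v h; simp at h
  | cons x t ih =>
    intro j v h
    cases j with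
    | zero =>
      cases t with
      | nil => simp at h
      | cons y t' => simp [List.eraseIdx]
    | succ i =>
      have := ih i v (by simp at h ⊢; omega)
      simp [this]

lemma scanA (xs : List Int) :
    (List.range' 1 (xs.length - 1)).foldl (pvStepA xs) (true, 0, none)
      = (!((xs.zip (xs.drop 1)).any fun p => decide (p.1 > p.2)),
         match pvBestRef 0 (xs.zip (xs.drop 1)) with
         | none => (0, (none : Option Int))
         | some (j, s) => (j, some s)) := by
  rw [show xs.length - 1 = (xs.zip (xs.drop 1)).length from (pv_zip_length xs).symm]
  rw [pv_bridge xs ((xs.zip (xs.drop 1)).length) 0 _ (by omega)]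
  simpa using pv_lemA_none (xs.zip (xs.drop 1)) 0 true 0

lemma loopA_sorted (fa : Nat) (xs : List Int) (acc : Int) (h : dCount xs = 0) :
    pvLoopA fa xs acc = acc := by
  cases fa with
  | zero => rfl
  | succ f =>
    have hany : ((xs.zip (xs.drop 1)).any fun p => decide (p.1 > p.2)) = false := by
      rw [List.any_eq_false]
      intro pq hm
      have := List.countP_eq_zero.mp h pq hm
      simpa using this
    have hany2 : (!((xs.zip (xs.drop 1)).any fun p => decide (p.1 > p.2))) = true := by
      rw [hany]; rfl
    simp only [pvLoopA]
    rw [scanA]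
    simp only [hany2]
    rfl

lemma loopA_merge (fa : Nat) (xs : List Int) (acc : Int) (t : Nat) (s : Int)
    (hne : dCount xs ≠ 0) (hbr : pvBestRef 0 (xs.zip (xs.drop 1)) = some (t, s)) :
    pvLoopA (fa + 1) xs acc = pvLoopA fa (xs.take t ++ [s] ++ xs.drop (t + 2)) (acc + 1) := by
  have hany : ((xs.zip (xs.drop 1)).any fun p => decide (p.1 > p.2)) = true := by
    rw [List.any_eq_true]
    by_contra hco
    push_neg at hco
    exact hne (List.countP_eq_zero.mpr (fun a ha => by simpa using hco a ha))
  obtain ⟨-, hex⟩ := pv_bestRef_spec _ 0 t s hbr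
  obtain ⟨hlt, hval⟩ := hex
  simp only [Nat.sub_zero] at hlt hval
  have hj2 : t + 1 < xs.length := by have := pv_zip_length xs; omega
  have hj1 : t < xs.length := by omega
  have hsum : xs.getD t 0 + xs.getD (t + 1) 0 = s := by
    rw [List.getD_eq_getElem _ _ hj1, List.getD_eq_getElem _ _ hj2, hval, pv_zip_get xs t hlt]
  have hmerge : (xs.set t (xs.getD t 0 + xs.getD (t + 1) 0)).eraseIdx (t + 1)
      = xs.take t ++ [s] ++ xs.drop (t + 2) := by
    rw [hsum]; exact pv_merge_eq xs t s hj2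
  have hany2 : (!((xs.zip (xs.drop 1)).any fun p => decide (p.1 > p.2))) = false := by
    rw [hany]; rfl
  simp only [pvLoopA]
  rw [scanA, hbr]
  simp only [hany2]
  show pvLoopA fa ((xs.set t (xs.getD t 0 + xs.getD (t + 1) 0)).eraseIdx (t + 1)) (acc + 1) = _
  rw [hmerge]

lemma bestRef_eq_of : ∀ (ps : List (Int × Int)) (k t : Nat) (s : Int) (h1 : t < ps.length),
    s = (ps[t]'h1).1 + (ps[t]'h1).2 →
    (∀ u (hu : u < ps.length), s ≤ (ps[u]'hu).1 + (ps[u]'hu).2) →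
    (∀ u (hu : u < ps.length), u < t → s < (ps[u]'hu).1 + (ps[u]'hu).2) →
    pvBestRef k ps = some (k + t, s) := by
  intro ps
  induction ps with
  | nil => intro k t s h1; exact absurd h1 (by simp)
  | cons p rest ih =>
    intro k t s h1 hs hmin hstrict
    obtain ⟨a, b⟩ := p
    cases t with
    | zero =>
      simp only [List.getElem_cons_zero] at hs
      simp only [pvBestRef]
      cases hb : pvBestRef (k + 1) rest with
      | none => simp [hs]
      | some js =>
        obtain ⟨j', s'⟩ := js
        obtain ⟨hkj, hex⟩ := pv_bestRef_spec rest (k + 1) j' s' hb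
        obtain ⟨hlt, hval⟩ := hex
        have hle : a + b ≤ s' := by
          have h2 : j' - (k + 1) + 1 < (( (a, b) :: rest)).length := by simp; omega
          have := hmin (j' - (k + 1) + 1) h2
          simp only [List.getElem_cons_succ] at this
          rw [← hs]
          rw [hval]
          exact this
        simp [hle, hs]
    | succ t' =>
      simp only [pvBestRef]
      have h1' : t' < rest.length := by simpa using h1
      have hrec := ih (k + 1) t' s h1'
        (by simpa using hs)
        (by
          intro u hu
          have := hmin (u + 1) (by simpa using hu)
          simpa using this)
        (by
          intro u hu hut
          have := hstrict (u + 1) (by simpa using hu) (by omega)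
          simpa using this)
      rw [hrec]
      have hlt0 : s < a + b := by
        have := hstrict 0 (by simp) (by omega)
        simpa using this
      have hnle : ¬ (a + b ≤ s) := by omega
      simp only [hnle, if_false]
      rw [show k + 1 + t' = k + (t' + 1) from by omega]

-- ---------- B-side loop step equations ----------

lemma loopH_stop (f : Nat) (vals : List Int) (nxt prv : List (Option Nat)) (alive : List Bool)
    (heap : List (Int × Nat × Nat)) (bad count : Int) (h : bad ≤ 0) :
    pvLoopH (f + 1) vals nxt prv alive heap bad count = count := by
  simp only [pvLoopH]
  rw [if_pos h]

lemma loopH_skip (f : Nat) (vals : List Int) (nxt prv : List (Option Nat)) (alive : List Bool)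
    (s : Int) (i j : Nat) (rest : List (Int × Nat × Nat)) (bad count : Int)
    (hbad : ¬ bad ≤ 0)
    (hchk : (alive.getD i false && (nxt.getD i none == some j)
              && (s == vals.getD i 0 + vals.getD j 0)) = false) :
    pvLoopH (f + 1) vals nxt prv alive ((s, i, j) :: rest) bad count
      = pvLoopH f vals nxt prv alive rest bad count := by
  simp only [pvLoopH]
  rw [if_neg hbad]
  simp only [hchk]
  rfl

-- the merged state of one valid B-step, spelled out (heap part and bad part)
def pvMergedHeap (vals : List Int) (nxt prv : List (Option Nat))
    (s : Int) (i j : Nat) (rest : List (Int × Nat × Nat)) : List (Int × Nat × Nat) :=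
  let vals' := vals.set i s
  let h1 := match prv.getD i none with
    | some p' => pvInsort (vals'.getD p' 0 + s, p', i) rest
    | none => rest
  match nxt.getD j none with
  | some k' => pvInsort (s + vals'.getD k' 0, i, k') h1
  | none => h1

def pvMergedBad (vals : List Int) (nxt prv : List (Option Nat))
    (s : Int) (i j : Nat) (bad : Int) : Int :=
  let vals' := vals.set i s
  let bad1 := bad - (if vals.getD i 0 > vals.getD j 0 then 1 else 0)
  let bad2 := match prv.getD i none with
    | some p' => bad1 - (if vals.getD p' 0 > vals.getD i 0 then 1 else 0)
    | none => bad1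
  let bad3 := match nxt.getD j none with
    | some k' => bad2 - (if vals.getD j 0 > vals.getD k' 0 then 1 else 0)
    | none => bad2
  let bad4 := match prv.getD i none with
    | some p' => bad3 + (if vals'.getD p' 0 > s then 1 else 0)
    | none => bad3
  match nxt.getD j none with
  | some k' => bad4 + (if s > vals'.getD k' 0 then 1 else 0)
  | none => bad4

lemma loopH_merge (f : Nat) (vals : List Int) (nxt prv : List (Option Nat)) (alive : List Bool)
    (s : Int) (i j : Nat) (rest : List (Int × Nat × Nat)) (bad count : Int)
    (hbad : ¬ bad ≤ 0)
    (hchk : (alive.getD i false && (nxt.getD i none == some j)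
              && (s == vals.getD i 0 + vals.getD j 0)) = true) :
    pvLoopH (f + 1) vals nxt prv alive ((s, i, j) :: rest) bad count
      = pvLoopH f (vals.set i s) (nxt.set i (nxt.getD j none))
          (match nxt.getD j none with | some k' => prv.set k' (some i) | none => prv)
          (alive.set j false)
          (pvMergedHeap vals nxt prv s i j rest)
          (pvMergedBad vals nxt prv s i j bad)
          (count + 1) := by
  simp only [pvLoopH]
  rw [if_neg hbad]
  simp only [hchk]
  cases hp : prv.getD i none <;> cases hk : nxt.getD j none <;>
    simp only [pvMergedHeap, pvMergedBad, hp, hk] <;> rfl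

-- ---------- decomposition of the chain at a valid entry ----------

lemma chain_decomp (vals : List Int) (nxt prv : List (Option Nat)) (alive : List Bool)
    (heap : List (Int × Nat × Nat)) (bad : Int) (c : List Nat) (i j : Nat)
    (inv : PvInv vals nxt prv alive heap bad c)
    (ha : alive.getD i false = true) (hn : nxt.getD i none = some j) :
    ∃ c1 c2, c = c1 ++ i :: j :: c2 := by
  have hilen : i < alive.length := by
    by_contra hco
    push_neg at hco
    rw [List.getD_eq_default _ _ hco] at ha
    exact Bool.false_ne_true ha
  have hic : i ∈ c := (inv.alv i hilen).mp ha
  obtain ⟨c1, c2', hc⟩ := List.append_of_mem hic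
  subst hc
  have hlk := (linkN_append nxt c1 (i :: c2') none).mp inv.lkn
  have h1 := hlk.2.1
  cases c2' with
  | nil => rw [hn] at h1; exact absurd h1 (by simp)
  | cons j0 c2 =>
    rw [hn] at h1
    have : j0 = j := by simpa using h1.symm
    subst this
    exact ⟨c1, c2, rfl⟩

-- facts extracted from the invariant at a decomposed chain
lemma chain_facts (c1 c2 : List Nat) (i j : Nat)
    (hpw : (c1 ++ i :: j :: c2).Pairwise (· < ·)) :
    (∀ a ∈ c1, a < i) ∧ i < j ∧ (∀ x ∈ c2, j < x) ∧ (∀ a ∈ c1, ∀ x ∈ i :: j :: c2, a < x)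
      ∧ (∀ x ∈ c2, i < x) := by
  rw [List.pairwise_append] at hpw
  obtain ⟨hu, hv, hcross⟩ := hpw
  rw [List.pairwise_cons] at hv
  obtain ⟨hiall, hv2⟩ := hv
  rw [List.pairwise_cons] at hv2
  obtain ⟨hjall, _⟩ := hv2
  exact ⟨fun a ha => hcross a ha i List.mem_cons_self,
         hiall j List.mem_cons_self,
         hjall,
         hcross,
         fun x hx => hiall x (List.mem_cons_of_mem _ hx)⟩

-- ---------- invariant preservation: skip ----------

lemma inv_skip (vals : List Int) (nxt prv : List (Option Nat)) (alive : List Bool)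
    (s : Int) (i j : Nat) (rest : List (Int × Nat × Nat)) (bad : Int) (c : List Nat)
    (inv : PvInv vals nxt prv alive ((s, i, j) :: rest) bad c)
    (hchk : (alive.getD i false && (nxt.getD i none == some j)
              && (s == vals.getD i 0 + vals.getD j 0)) = false) :
    PvInv vals nxt prv alive rest bad c := by
  refine ⟨inv.pw, inv.bnd, inv.lnx, inv.lpr, inv.lvl, inv.alv, inv.lkn, inv.lkp, inv.bd,
          (List.pairwise_cons.mp inv.srt).2, ?_⟩
  intro pq hm
  have h1 := inv.mem pq hm
  rcases List.mem_cons.mp h1 with he | he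
  · exfalso
    have hpq1 : pq.1 ∈ c := (mem_pairsL c pq hm).1
    have hb1 : pq.1 < alive.length := inv.bnd _ hpq1
    have ha : alive.getD pq.1 false = true := (inv.alv _ hb1).mpr hpq1
    have hnn : nxt.getD pq.1 none = some pq.2 := linkN_pairs nxt c pq inv.lkn hm
    have hs' : s = vals.getD pq.1 0 + vals.getD pq.2 0 := by
      have := congrArg Prod.fst he; simpa using this.symm
    have hi' : pq.1 = i := by
      have := congrArg (fun x => x.2.1) he; simpa using this
    have hj' : pq.2 = j := by
      have := congrArg (fun x => x.2.2) he; simpa using this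
    rw [hi'] at ha
    rw [hi', hj'] at hnn
    rw [hi', hj'] at hs'
    rw [ha, hnn, ← hs'] at hchk
    simp at hchk
  · exact he

lemma pvEntLe_iff (a b : Int × Nat × Nat) :
    pvEntLe a b = true ↔
      (a.1 < b.1 ∨ (a.1 = b.1 ∧ (a.2.1 < b.2.1 ∨ (a.2.1 = b.2.1 ∧ a.2.2 ≤ b.2.2)))) := by
  simp [pvEntLe]

lemma lastO_map' {α β : Type} (f : α → β) (u : List α) :
    lastO (u.map f) none = (lastO u none).map f := by
  have := lastO_map f u none
  simpa using this

lemma head?_map' {α β : Type} (f : α → β) (u : List α) :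
    (u.map f).head? = u.head?.map f := by
  cases u <;> simp

-- ---------- invariant preservation: merge ----------

lemma inv_merge (vals : List Int) (nxt prv : List (Option Nat)) (alive : List Bool)
    (rest : List (Int × Nat × Nat)) (bad : Int) (c1 c2 : List Nat) (s : Int) (i j : Nat)
    (inv : PvInv vals nxt prv alive ((s, i, j) :: rest) bad (c1 ++ i :: j :: c2))
    (hs : s = vals.getD i 0 + vals.getD j 0) :
    PvInv (vals.set i s) (nxt.set i (nxt.getD j none))
        (match nxt.getD j none with | some k' => prv.set k' (some i) | none => prv)
        (alive.set j false)
        (pvMergedHeap vals nxt prv s i j rest)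
        (pvMergedBad vals nxt prv s i j bad)
        (c1 ++ i :: c2)
      ∧ (pvMergedHeap vals nxt prv s i j rest).length ≤ rest.length + 2 := by
  obtain ⟨hc1i, hij, hjc2, hcross, hic2⟩ := chain_facts c1 c2 i j inv.pw
  have hilen : i < alive.length := inv.bnd i (by simp)
  have hjlen : j < alive.length := inv.bnd j (by simp)
  have hivl : i < vals.length := by rw [inv.lvl]; exact hilen
  have hinx : i < nxt.length := by rw [inv.lnx]; exact hilen
  have hlk := (linkN_append nxt c1 (i :: j :: c2) none).mp inv.lkn
  have hlkn1 : linkN nxt c1 (some i) := hlk.1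
  have hni : nxt.getD i none = some j := hlk.2.1
  have hnj : nxt.getD j none = c2.head? := by
    have h0 := hlk.2.2.1
    rw [h0]
    cases c2 <;> rfl
  have hlknc2 : linkN nxt c2 none := hlk.2.2.2
  have hlp := (linkP_append prv c1 (i :: j :: c2) none).mp inv.lkp
  have hlkp1 : linkP prv none c1 := hlp.1
  have hpi : prv.getD i none = lastO c1 none := hlp.2.1
  have hlpc2 : linkP prv (some j) c2 := hlp.2.2.2
  have hinc1 : i ∉ c1 := fun h => absurd (hc1i i h) (lt_irrefl i)
  have hinc2 : i ∉ c2 := fun h => absurd (hic2 i h) (lt_irrefl i)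
  have hjnc1 : j ∉ c1 := fun h => absurd (hcross j h j (by simp)) (lt_irrefl j)
  have hjnc2 : j ∉ c2 := fun h => absurd (hjc2 j h) (lt_irrefl j)
  have hnij : i ≠ j := Nat.ne_of_lt hij
  -- values after the write
  have hvc1 : ∀ a ∈ c1, (vals.set i s).getD a 0 = vals.getD a 0 :=
    fun a ha => getD_set_ne vals 0 i a s (Nat.ne_of_lt (hc1i a ha))
  have hvc2 : ∀ a ∈ c2, (vals.set i s).getD a 0 = vals.getD a 0 :=
    fun a ha => getD_set_ne vals 0 i a s (Nat.ne_of_gt (hic2 a ha))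
  have hvi' : (vals.set i s).getD i 0 = s := getD_set_self vals 0 i s hivl
  have hrest_mem : ∀ pq ∈ pairsL c1 ++ pairsL c2,
      ((vals.getD pq.1 0 + vals.getD pq.2 0, pq.1, pq.2) : Int × Nat × Nat) ∈ rest := by
    intro pq hm
    have hmc : pq ∈ pairsL (c1 ++ i :: j :: c2) := by
      rw [pairsL_append]
      rcases List.mem_append.mp hm with h | h
      · exact List.mem_append_left _ (List.mem_append_left _ h)
      · refine List.mem_append_right _ ?_
        have h2 : pq ∈ pairsL (j :: c2) := by
          rw [pairsL_cons]
          exact List.mem_append_right _ h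
        have h3 : pairsL (i :: j :: c2) = (i, j) :: pairsL (j :: c2) := by simp [pairsL]
        rw [h3]
        exact List.mem_cons_of_mem _ h2
    have h1 := inv.mem pq hmc
    rcases List.mem_cons.mp h1 with he | he
    · exfalso
      have hi' : pq.1 = i := by
        have := congrArg (fun x => x.2.1) he; simpa using this
      rcases List.mem_append.mp hm with h | h
      · have := hc1i pq.1 (mem_pairsL c1 pq h).1
        omega
      · have := hic2 pq.1 (mem_pairsL c2 pq h).1
        omega
    · exact he
  refine ⟨⟨?_, ?_, ?_, ?_, ?_, ?_, ?_, ?_, ?_, ?_, ?_⟩, ?_⟩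
  -- pw
  · refine inv.pw.sublist ?_
    exact List.Sublist.append_left ((List.sublist_cons_self j c2).cons₂ i) c1
  -- bnd
  · intro x hx
    rw [List.length_set]
    apply inv.bnd
    simp only [List.mem_append, List.mem_cons] at hx ⊢
    tauto
  -- lnx
  · simp [inv.lnx]
  -- lpr
  · cases hk : nxt.getD j none <;> simp [inv.lpr]
  -- lvl
  · simp [inv.lvl]
  -- alv
  · intro i' hlen'
    rw [List.length_set] at hlen'
    by_cases hij' : i' = j
    · subst hij'
      rw [getD_set_self alive false i' false hjlen]
      constructor
      · intro h; exact absurd h Bool.false_ne_true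
      · intro hmem
        exfalso
        simp only [List.mem_append, List.mem_cons] at hmem
        rcases hmem with h | h | h
        · exact hjnc1 h
        · exact hnij h.symm
        · exact hjnc2 h
    · rw [getD_set_ne alive false j i' false hij']
      rw [inv.alv i' hlen']
      simp only [List.mem_append, List.mem_cons]
      constructor
      · rintro (h | h | h | h) <;> tauto
      · rintro (h | h | h) <;> tauto
  -- lkn
  · rw [linkN_append]
    constructor
    · refine linkN_congr nxt _ c1 _ ?_ hlkn1
      intro a ha; exact getD_set_ne nxt none i a _ (Nat.ne_of_lt (hc1i a ha))
    · refine ⟨?_, ?_⟩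
      · rw [getD_set_self nxt none i _ hinx, hnj]
        cases c2 <;> rfl
      · refine linkN_congr nxt _ c2 _ ?_ hlknc2
        intro a ha; exact getD_set_ne nxt none i a _ (Nat.ne_of_gt (hic2 a ha))
  -- lkp
  · cases hc2e : c2 with
    | nil =>
      rw [hc2e] at hnj
      simp only [List.head?_nil] at hnj
      simp only [hnj]
      rw [linkP_append]
      exact ⟨hlkp1, hpi, trivial⟩
    | cons k' c2' =>
      rw [hc2e] at hnj
      simp only [List.head?_cons] at hnj
      simp only [hnj]
      have hk'c2 : k' ∈ c2 := by rw [hc2e]; exact List.mem_cons_self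
      have hik' : i < k' := hic2 k' hk'c2
      have hk'len : k' < prv.length := by
        rw [inv.lpr]; exact inv.bnd k' (by simp [hc2e])
      have hpwc2 : (k' :: c2').Pairwise (· < ·) := by
        rw [← hc2e]
        refine inv.pw.sublist ?_
        exact List.sublist_append_of_sublist_right
          ((c2.sublist_cons_self j).trans (List.sublist_cons_self i _))
      rw [linkP_append]
      constructor
      · refine linkP_congr prv _ c1 none ?_ hlkp1
        intro a ha
        exact getD_set_ne prv none k' a _ (Nat.ne_of_lt (lt_trans (hc1i a ha) hik'))
      · refine ⟨?_, ?_, ?_⟩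
        · rw [getD_set_ne prv none k' i _ (Nat.ne_of_lt hik')]
          exact hpi
        · exact getD_set_self prv none k' _ hk'len
        · rw [hc2e] at hlpc2
          refine linkP_congr prv _ c2' (some k') ?_ hlpc2.2
          intro a ha
          exact getD_set_ne prv none k' a _
            (Nat.ne_of_gt ((List.pairwise_cons.mp hpwc2).1 a ha))
  -- bd
  · have hmapc : (c1 ++ i :: j :: c2).map (fun x => vals.getD x 0)
        = c1.map (fun x => vals.getD x 0) ++ vals.getD i 0 :: vals.getD j 0 :: c2.map (fun x => vals.getD x 0) := by
      simp
    have hmapc' : (c1 ++ i :: c2).map (fun x => (vals.set i s).getD x 0)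
        = c1.map (fun x => vals.getD x 0) ++ s :: c2.map (fun x => vals.getD x 0) := by
      simp only [List.map_append, List.map_cons]
      rw [List.map_congr_left hvc1, List.map_congr_left hvc2, hvi']
    simp only [pvMergedBad, hpi, hnj]
    cases hp2 : lastO c1 none with
    | none =>
      cases hc2h : c2.head? with
      | none =>
        have hold : bad = ((dCount (c1.map (fun x => vals.getD x 0))
            + dCount (c2.map (fun x => vals.getD x 0))
            + (if vals.getD i 0 > vals.getD j 0 then 1 else 0) : Nat) : Int) := by
          rw [inv.bd, hmapc, dCount_mid, lastO_map', head?_map', hp2, hc2h]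
          simp
          all_goals omega
        have hnew : ((dCount ((c1 ++ i :: c2).map (fun x => (vals.set i s).getD x 0)) : Nat) : Int)
            = ((dCount (c1.map (fun x => vals.getD x 0))
                + dCount (c2.map (fun x => vals.getD x 0)) : Nat) : Int) := by
          rw [hmapc', dCount_mid1, lastO_map', head?_map', hp2, hc2h]
          simp
        show bad - (if vals.getD i 0 > vals.getD j 0 then 1 else 0)
            = ((dCount ((c1 ++ i :: c2).map (fun x => (vals.set i s).getD x 0)) : Nat) : Int)
        split_ifs at hold ⊢ <;> omega
      | some k' =>
        have hk'c2 : k' ∈ c2 := List.mem_of_mem_head? hc2h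
        have hold : bad = ((dCount (c1.map (fun x => vals.getD x 0))
            + dCount (c2.map (fun x => vals.getD x 0))
            + (if vals.getD i 0 > vals.getD j 0 then 1 else 0)
            + (if vals.getD j 0 > vals.getD k' 0 then 1 else 0) : Nat) : Int) := by
          rw [inv.bd, hmapc, dCount_mid, lastO_map', head?_map', hp2, hc2h]
          simp
          all_goals omega
        have hnew : ((dCount ((c1 ++ i :: c2).map (fun x => (vals.set i s).getD x 0)) : Nat) : Int)
            = ((dCount (c1.map (fun x => vals.getD x 0))
                + dCount (c2.map (fun x => vals.getD x 0))
                + (if s > vals.getD k' 0 then 1 else 0) : Nat) : Int) := by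
          rw [hmapc', dCount_mid1, lastO_map', head?_map', hp2, hc2h]
          simp
          all_goals omega
        show bad - (if vals.getD i 0 > vals.getD j 0 then 1 else 0)
              - (if vals.getD j 0 > vals.getD k' 0 then 1 else 0)
              + (if s > (vals.set i s).getD k' 0 then 1 else 0)
            = ((dCount ((c1 ++ i :: c2).map (fun x => (vals.set i s).getD x 0)) : Nat) : Int)
        simp only [hvc2 k' hk'c2]
        split_ifs at hold hnew ⊢ <;> omega
    | some p' =>
      have hp'c1 : p' ∈ c1 := by
        rcases lastO_mem_or c1 none p' hp2 with h | h
        · exact h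
        · exact absurd h (by simp)
      cases hc2h : c2.head? with
      | none =>
        have hold : bad = ((dCount (c1.map (fun x => vals.getD x 0))
            + dCount (c2.map (fun x => vals.getD x 0))
            + (if vals.getD i 0 > vals.getD j 0 then 1 else 0)
            + (if vals.getD p' 0 > vals.getD i 0 then 1 else 0) : Nat) : Int) := by
          rw [inv.bd, hmapc, dCount_mid, lastO_map', head?_map', hp2, hc2h]
          simp
          all_goals omega
        have hnew : ((dCount ((c1 ++ i :: c2).map (fun x => (vals.set i s).getD x 0)) : Nat) : Int)
            = ((dCount (c1.map (fun x => vals.getD x 0))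
                + dCount (c2.map (fun x => vals.getD x 0))
                + (if vals.getD p' 0 > s then 1 else 0) : Nat) : Int) := by
          rw [hmapc', dCount_mid1, lastO_map', head?_map', hp2, hc2h]
          simp
          all_goals omega
        show bad - (if vals.getD i 0 > vals.getD j 0 then 1 else 0)
              - (if vals.getD p' 0 > vals.getD i 0 then 1 else 0)
              + (if (vals.set i s).getD p' 0 > s then 1 else 0)
            = ((dCount ((c1 ++ i :: c2).map (fun x => (vals.set i s).getD x 0)) : Nat) : Int)
        simp only [hvc1 p' hp'c1]
        split_ifs at hold hnew ⊢ <;> omega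
      | some k' =>
        have hk'c2 : k' ∈ c2 := List.mem_of_mem_head? hc2h
        have hold : bad = ((dCount (c1.map (fun x => vals.getD x 0))
            + dCount (c2.map (fun x => vals.getD x 0))
            + (if vals.getD i 0 > vals.getD j 0 then 1 else 0)
            + (if vals.getD p' 0 > vals.getD i 0 then 1 else 0)
            + (if vals.getD j 0 > vals.getD k' 0 then 1 else 0) : Nat) : Int) := by
          rw [inv.bd, hmapc, dCount_mid, lastO_map', head?_map', hp2, hc2h]
          simp
          all_goals omega
        have hnew : ((dCount ((c1 ++ i :: c2).map (fun x => (vals.set i s).getD x 0)) : Nat) : Int)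
            = ((dCount (c1.map (fun x => vals.getD x 0))
                + dCount (c2.map (fun x => vals.getD x 0))
                + (if vals.getD p' 0 > s then 1 else 0)
                + (if s > vals.getD k' 0 then 1 else 0) : Nat) : Int) := by
          rw [hmapc', dCount_mid1, lastO_map', head?_map', hp2, hc2h]
          simp
          all_goals omega
        show bad - (if vals.getD i 0 > vals.getD j 0 then 1 else 0)
              - (if vals.getD p' 0 > vals.getD i 0 then 1 else 0)
              - (if vals.getD j 0 > vals.getD k' 0 then 1 else 0)
              + (if (vals.set i s).getD p' 0 > s then 1 else 0)
              + (if s > (vals.set i s).getD k' 0 then 1 else 0)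
            = ((dCount ((c1 ++ i :: c2).map (fun x => (vals.set i s).getD x 0)) : Nat) : Int)
        simp only [hvc1 p' hp'c1, hvc2 k' hk'c2]
        split_ifs at hold hnew ⊢ <;> omega
  -- srt
  · have hsrt : rest.Pairwise (fun a b => pvEntLe a b = true) := (List.pairwise_cons.mp inv.srt).2
    simp only [pvMergedHeap]
    cases hp : prv.getD i none <;> cases hk : nxt.getD j none <;>
      simp only [] <;>
      first
        | exact hsrt
        | exact pairwise_insort _ _ hsrt
        | exact pairwise_insort _ _ (pairwise_insort _ _ hsrt)
  -- mem
  · intro pq hm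
    have hsub : ∀ x ∈ rest, x ∈ pvMergedHeap vals nxt prv s i j rest := by
      intro x hx
      simp only [pvMergedHeap]
      cases hp2 : prv.getD i none <;> cases hk2 : nxt.getD j none <;>
        simp [mem_insort, hx]
    rw [pairsL_append] at hm
    rcases List.mem_append.mp hm with hm1 | hm2
    · rcases List.mem_append.mp hm1 with hA | hB
      · obtain ⟨h1, h2⟩ := mem_pairsL c1 pq hA
        rw [hvc1 _ h1, hvc1 _ h2]
        exact hsub _ (hrest_mem pq (List.mem_append_left _ hA))
      · unfold glueL at hB
        cases hp2 : lastO c1 none with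
        | none => rw [hp2] at hB; simp at hB
        | some p' =>
          rw [hp2] at hB
          simp at hB
          have hp'c1 : p' ∈ c1 := by
            rcases lastO_mem_or c1 none p' hp2 with h | h
            · exact h
            · exact absurd h (by simp)
          simp only [hB]
          simp only [pvMergedHeap, hpi, hp2, hvi']
          cases hk2 : nxt.getD j none with
          | none => exact (mem_insort _ _ _).mpr (Or.inl rfl)
          | some k' => exact (mem_insort _ _ _).mpr (Or.inr ((mem_insort _ _ _).mpr (Or.inl rfl)))
    · cases hc2e : c2 with
      | nil =>
        rw [hc2e] at hm2
        simp [pairsL] at hm2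
      | cons k' c2' =>
        rw [hc2e] at hm2
        have hps : pairsL (i :: k' :: c2') = (i, k') :: pairsL (k' :: c2') := by simp [pairsL]
        rw [hps] at hm2
        rcases List.mem_cons.mp hm2 with hB | hC
        · simp only [hB]
          rw [hc2e] at hnj
          simp only [List.head?_cons] at hnj
          simp only [pvMergedHeap, hnj, hvi']
          exact (mem_insort _ _ _).mpr (Or.inl rfl)
        · have hC2 : pq ∈ pairsL c2 := by rw [hc2e]; exact hC
          obtain ⟨h1, h2⟩ := mem_pairsL c2 pq hC2
          rw [hvc2 _ h1, hvc2 _ h2]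
          exact hsub _ (hrest_mem pq (List.mem_append_right _ hC2))
  -- length bound
  · simp only [pvMergedHeap]
    cases hp : prv.getD i none <;> cases hk : nxt.getD j none <;>
      simp [length_insort] <;> omega

-- ---------- the merged pair is A's best pair ----------

lemma best_merge (vals : List Int) (nxt prv : List (Option Nat)) (alive : List Bool)
    (rest : List (Int × Nat × Nat)) (bad : Int) (c1 c2 : List Nat) (s : Int) (i j : Nat)
    (inv : PvInv vals nxt prv alive ((s, i, j) :: rest) bad (c1 ++ i :: j :: c2))
    (hs : s = vals.getD i 0 + vals.getD j 0) :
    pvBestRef 0 (pairsL ((c1 ++ i :: j :: c2).map (fun x => vals.getD x 0)))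
      = some (c1.length, s) := by
  obtain ⟨hc1i, hij, hjc2, hcross, hic2⟩ := chain_facts c1 c2 i j inv.pw
  have hlenc : (c1 ++ i :: j :: c2).length = c1.length + 2 + c2.length := by simp; omega
  have hplen : (pairsL (c1 ++ i :: j :: c2)).length = c1.length + 1 + c2.length := by
    rw [length_pairsL]; omega
  have hyslen : (pairsL ((c1 ++ i :: j :: c2).map (fun x => vals.getD x 0))).length
      = c1.length + 1 + c2.length := by
    rw [length_pairsL, List.length_map]; omega
  have hct0 : (c1 ++ i :: j :: c2)[c1.length]'(by omega) = i := by
    rw [List.getElem_append_right (le_refl c1.length)]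
    simp
  have hct1 : (c1 ++ i :: j :: c2)[c1.length + 1]'(by omega) = j := by
    rw [List.getElem_append_right (by omega : c1.length ≤ c1.length + 1)]
    simp
  have hdmin : ∀ x ∈ (s, i, j) :: rest, pvEntLe (s, i, j) x = true := by
    intro x hx
    rcases List.mem_cons.mp hx with rfl | hx'
    · exact pvEntLe_refl _
    · exact (List.pairwise_cons.mp inv.srt).1 x hx'
  -- for every position u over the chain pairs, relate to the heap minimum
  have hkey : ∀ (u : Nat) (hu : u < (pairsL (c1 ++ i :: j :: c2)).length),
      (s < vals.getD ((c1 ++ i :: j :: c2)[u]'(by have := length_pairsL (c1 ++ i :: j :: c2); omega)) 0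
            + vals.getD ((c1 ++ i :: j :: c2)[u + 1]'(by have := length_pairsL (c1 ++ i :: j :: c2); omega)) 0)
        ∨ (s = vals.getD ((c1 ++ i :: j :: c2)[u]'(by have := length_pairsL (c1 ++ i :: j :: c2); omega)) 0
            + vals.getD ((c1 ++ i :: j :: c2)[u + 1]'(by have := length_pairsL (c1 ++ i :: j :: c2); omega)) 0
           ∧ (i < (c1 ++ i :: j :: c2)[u]'(by have := length_pairsL (c1 ++ i :: j :: c2); omega)
              ∨ (i = (c1 ++ i :: j :: c2)[u]'(by have := length_pairsL (c1 ++ i :: j :: c2); omega)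
                 ∧ j ≤ (c1 ++ i :: j :: c2)[u + 1]'(by have := length_pairsL (c1 ++ i :: j :: c2); omega)))) := by
    intro u hu
    have hmemu : (pairsL (c1 ++ i :: j :: c2))[u] ∈ pairsL (c1 ++ i :: j :: c2) :=
      List.getElem_mem hu
    have hent := inv.mem _ hmemu
    have hle := hdmin _ hent
    rw [pvEntLe_iff] at hle
    rw [getElem_pairsL] at hle
    simpa using hle
  have hget : ∀ (u : Nat) (hu : u < (pairsL ((c1 ++ i :: j :: c2).map (fun x => vals.getD x 0))).length),
      (pairsL ((c1 ++ i :: j :: c2).map (fun x => vals.getD x 0)))[u]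
        = (vals.getD ((c1 ++ i :: j :: c2)[u]'(by
              have := length_pairsL ((c1 ++ i :: j :: c2).map (fun x => vals.getD x 0))
              simp at this ⊢; omega)) 0,
           vals.getD ((c1 ++ i :: j :: c2)[u + 1]'(by
              have := length_pairsL ((c1 ++ i :: j :: c2).map (fun x => vals.getD x 0))
              simp at this ⊢; omega)) 0) := by
    intro u hu
    rw [getElem_pairsL _ u hu]
    simp only [List.getElem_map]
  have h1 : c1.length < (pairsL ((c1 ++ i :: j :: c2).map (fun x => vals.getD x 0))).length := by
    rw [hyslen]; omega
  have hres := bestRef_eq_of (pairsL ((c1 ++ i :: j :: c2).map (fun x => vals.getD x 0)))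
    0 c1.length s h1
    (by
      rw [hget c1.length h1]
      simp only [hct0, hct1]
      exact hs)
    (by
      intro u hu
      rw [hget u hu]
      have hu' : u < (pairsL (c1 ++ i :: j :: c2)).length := by
        rw [hplen]; rw [hyslen] at hu; omega
      rcases hkey u hu' with h | h
      · exact le_of_lt h
      · exact le_of_eq h.1)
    (by
      intro u hu hut
      rw [hget u hu]
      have hu' : u < (pairsL (c1 ++ i :: j :: c2)).length := by
        rw [hplen]; rw [hyslen] at hu; omega
      have hcu : (c1 ++ i :: j :: c2)[u]'(by
          have := length_pairsL (c1 ++ i :: j :: c2); omega) < i := by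
        have hpe := List.pairwise_iff_getElem.mp inv.pw u c1.length
          (by have := length_pairsL (c1 ++ i :: j :: c2); omega) (by omega) hut
        rw [hct0] at hpe
        exact hpe
      rcases hkey u hu' with h | h
      · exact h
      · exfalso
        rcases h.2 with h2 | h2
        · omega
        · omega)
  simpa using hres

-- ---------- A's merged list = value map of the merged chain ----------

lemma ys_merge (vals : List Int) (c1 c2 : List Nat) (s : Int) (i j : Nat)
    (hvi : i < vals.length)
    (hc1 : ∀ a ∈ c1, (vals.set i s).getD a 0 = vals.getD a 0)
    (hc2 : ∀ a ∈ c2, (vals.set i s).getD a 0 = vals.getD a 0) :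
    ((c1 ++ i :: j :: c2).map (fun x => vals.getD x 0)).take c1.length
      ++ [s]
      ++ ((c1 ++ i :: j :: c2).map (fun x => vals.getD x 0)).drop (c1.length + 2)
    = (c1 ++ i :: c2).map (fun x => (vals.set i s).getD x 0) := by
  have hmap : (c1 ++ i :: j :: c2).map (fun x => vals.getD x 0)
      = (c1.map (fun x => vals.getD x 0) ++ [vals.getD i 0, vals.getD j 0])
        ++ c2.map (fun x => vals.getD x 0) := by
    simp
  have htake : ((c1 ++ i :: j :: c2).map (fun x => vals.getD x 0)).take c1.length
      = c1.map (fun x => vals.getD x 0) := by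
    rw [hmap, List.append_assoc]
    rw [List.take_left' (by simp)]
  have hdrop : ((c1 ++ i :: j :: c2).map (fun x => vals.getD x 0)).drop (c1.length + 2)
      = c2.map (fun x => vals.getD x 0) := by
    rw [hmap]
    rw [List.drop_left' (by simp)]
  rw [htake, hdrop]
  simp only [List.map_append, List.map_cons]
  rw [List.map_congr_left hc1, List.map_congr_left hc2,
      getD_set_self vals 0 i s hvi]
  simp

-- ---------- the simulation: B's loop tracks A's loop ----------

lemma sim : ∀ (fuel : Nat) (vals : List Int) (nxt prv : List (Option Nat)) (alive : List Bool)
    (heap : List (Int × Nat × Nat)) (bad count : Int) (c : List Nat) (fa : Nat),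
    PvInv vals nxt prv alive heap bad c →
    heap.length + 2 * c.length ≤ fuel →
    c.length ≤ fa + 1 →
    pvLoopH fuel vals nxt prv alive heap bad count
      = pvLoopA fa (c.map (fun x => vals.getD x 0)) count := by
  intro fuel
  induction fuel with
  | zero =>
    intro vals nxt prv alive heap bad count c fa inv hfu hfa
    have hc : c = [] := by
      cases c with
      | nil => rfl
      | cons a t => simp at hfu
    subst hc
    rw [loopA_sorted _ _ _ (by rfl)]
    rfl
  | succ f ih =>
    intro vals nxt prv alive heap bad count c fa inv hfu hfa
    by_cases hbad : bad ≤ 0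
    · rw [loopH_stop _ _ _ _ _ _ _ _ hbad]
      have hd0 : dCount (c.map (fun x => vals.getD x 0)) = 0 := by
        have := inv.bd
        omega
      rw [loopA_sorted _ _ _ hd0]
    · have hdpos : dCount (c.map (fun x => vals.getD x 0)) ≠ 0 := by
        have := inv.bd
        omega
      have hpcne : pairsL c ≠ [] := by
        intro h0
        apply hdpos
        unfold dCount
        rw [pairsL_map, h0]
        rfl
      obtain ⟨pq0, hpq0⟩ : ∃ pq, pq ∈ pairsL c := by
        cases hh : pairsL c with
        | nil => exact absurd hh hpcne
        | cons x t => exact ⟨x, List.mem_cons_self⟩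
      obtain ⟨e, rest, heq⟩ : ∃ e rest, heap = e :: rest := by
        cases heap with
        | nil =>
          have := inv.mem pq0 hpq0
          simp at this
        | cons e r => exact ⟨e, r, rfl⟩
      subst heq
      obtain ⟨s, i, j⟩ := e
      by_cases hchk : (alive.getD i false && (nxt.getD i none == some j)
          && (s == vals.getD i 0 + vals.getD j 0)) = true
      · -- a valid entry: both sides merge the same pair
        have hcomp : (alive.getD i false = true ∧ nxt.getD i none = some j)
            ∧ s = vals.getD i 0 + vals.getD j 0 := by
          simpa using hchk
        obtain ⟨⟨ha, hn⟩, hs⟩ := hcomp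
        obtain ⟨c1, c2, hcdec⟩ := chain_decomp vals nxt prv alive _ bad c i j inv ha hn
        subst hcdec
        rw [loopH_merge _ _ _ _ _ _ _ _ _ _ _ hbad hchk]
        obtain ⟨inv', hlenH⟩ := inv_merge vals nxt prv alive rest bad c1 c2 s i j inv hs
        obtain ⟨fa', rfl⟩ : ∃ fa', fa = fa' + 1 := by
          cases fa with
          | zero =>
            exfalso
            have hlc0 : (c1 ++ i :: j :: c2).length = c1.length + 2 + c2.length := by
              simp
              omega
            omega
          | succ fa' => exact ⟨fa', rfl⟩
        have hbest := best_merge vals nxt prv alive rest bad c1 c2 s i j inv hs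
        have hbest' : pvBestRef 0 (((c1 ++ i :: j :: c2).map (fun x => vals.getD x 0)).zip
            ((((c1 ++ i :: j :: c2)).map (fun x => vals.getD x 0)).drop 1))
            = some (c1.length, s) := hbest
        rw [loopA_merge fa' _ count c1.length s hdpos hbest']
        obtain ⟨hc1i, hij, hjc2, hcross, hic2⟩ := chain_facts c1 c2 i j inv.pw
        have hilen : i < alive.length := inv.bnd i (by simp)
        have hivl : i < vals.length := by rw [inv.lvl]; exact hilen
        rw [ys_merge vals c1 c2 s i j hivl
          (fun a ha' => getD_set_ne vals 0 i a s (Nat.ne_of_lt (hc1i a ha')))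
          (fun a ha' => getD_set_ne vals 0 i a s (Nat.ne_of_gt (hic2 a ha')))]
        refine ih _ _ _ _ _ _ _ _ fa' inv' ?_ ?_
        · simp only [List.length_cons, List.length_append] at hfu ⊢
          omega
        · simp only [List.length_cons, List.length_append] at hfa ⊢
          omega
      · -- a stale entry: B pops and rescans, A's side is untouched
        rw [loopH_skip _ _ _ _ _ _ _ _ _ _ _ hbad (by simpa using hchk)]
        refine ih _ _ _ _ _ _ _ _ fa
          (inv_skip _ _ _ _ _ _ _ _ _ _ inv (by simpa using hchk)) ?_ hfa
        simp only [List.length_cons] at hfu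
        omega

-- ---------- the initial state satisfies the invariant ----------

lemma getD_map_range {α : Type} (f : Nat → α) (d : α) (n x : Nat) (h : x < n) :
    ((List.range n).map f).getD x d = f x := by
  rw [List.getD_eq_getElem?_getD]
  simp [List.getElem?_map, List.getElem?_range, h]

lemma map_getD_range (nums : List Int) :
    (List.range nums.length).map (fun x => nums.getD x 0) = nums := by
  apply List.ext_getElem
  · simp
  · intro u h1 h2
    simp only [List.getElem_map, List.getElem_range]
    exact List.getD_eq_getElem _ _ h2

lemma linkN_range' : ∀ (m a n : Nat) (nxt : List (Option Nat)),
    a + m = n →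
    (∀ x, x < n → nxt.getD x none = if x + 1 < n then some (x + 1) else none) →
    linkN nxt (List.range' a m) none := by
  intro m
  induction m with
  | zero => intro a n nxt _ _; trivial
  | succ m ih =>
    intro a n nxt hsum hget
    rw [List.range'_succ]
    refine ⟨?_, ih (a + 1) n nxt (by omega) hget⟩
    rw [hget a (by omega)]
    cases m with
    | zero =>
      show (if a + 1 < n then some (a + 1) else none) = none
      rw [if_neg (by omega)]
    | succ m' =>
      show (if a + 1 < n then some (a + 1) else none) = some (a + 1)
      rw [if_pos (by omega)]

lemma linkP_range' : ∀ (m a n : Nat) (prv : List (Option Nat)),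
    a + m = n →
    (∀ x, x < n → prv.getD x none = if x = 0 then none else some (x - 1)) →
    linkP prv (if a = 0 then none else some (a - 1)) (List.range' a m) := by
  intro m
  induction m with
  | zero => intro a n prv _ _; trivial
  | succ m ih =>
    intro a n prv hsum hget
    rw [List.range'_succ]
    refine ⟨hget a (by omega), ?_⟩
    have h := ih (a + 1) n prv (by omega) hget
    simpa using h

lemma linkN_range (n : Nat) (nxt : List (Option Nat))
    (hget : ∀ x, x < n → nxt.getD x none = if x + 1 < n then some (x + 1) else none) :
    linkN nxt (List.range n) none := by
  rw [List.range_eq_range']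
  exact linkN_range' n 0 n nxt (by omega) hget

lemma linkP_range (n : Nat) (prv : List (Option Nat))
    (hget : ∀ x, x < n → prv.getD x none = if x = 0 then none else some (x - 1)) :
    linkP prv none (List.range n) := by
  rw [List.range_eq_range']
  have h := linkP_range' n 0 n prv (by omega) hget
  simpa using h

lemma bad_init (nums : List Int) :
    ((List.range (nums.length - 1)).filter
        (fun i => decide (nums.getD i 0 > nums.getD (i + 1) 0))).length
      = dCount nums := by
  have hpairs : pairsL nums
      = (List.range (nums.length - 1)).map (fun u => (nums.getD u 0, nums.getD (u + 1) 0)) := by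
    apply List.ext_getElem
    · simp [length_pairsL]
    · intro u h1 h2
      rw [getElem_pairsL nums u h1]
      have hlb : u < nums.length - 1 := by
        have := length_pairsL nums; omega
      simp only [List.getElem_map, List.getElem_range]
      rw [List.getD_eq_getElem _ _ (by omega), List.getD_eq_getElem _ _ (by omega)]
  rw [dCount, hpairs, List.countP_map, ← List.countP_eq_length_filter]
  rfl

lemma getD_replicate_true (n x : Nat) (h : x < n) :
    (List.replicate n true).getD x false = true := by
  rw [List.getD_eq_getElem?_getD]
  simp [List.getElem?_replicate, h]

lemma inv_init (nums : List Int) :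
    PvInv nums
      ((List.range nums.length).map (fun i => if i + 1 < nums.length then some (i + 1) else none))
      ((List.range nums.length).map (fun i => if i = 0 then none else some (i - 1)))
      (List.replicate nums.length true)
      (((List.range (nums.length - 1)).map
          (fun i => ((nums.getD i 0 + nums.getD (i + 1) 0, i, i + 1) : Int × Nat × Nat))).foldl
        (fun h e => pvInsort e h) [])
      (((List.range (nums.length - 1)).filter
          (fun i => decide (nums.getD i 0 > nums.getD (i + 1) 0))).length : Int)
      (List.range nums.length) := by
  refine ⟨?_, ?_, ?_, ?_, ?_, ?_, ?_, ?_, ?_, ?_, ?_⟩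
  · exact List.pairwise_lt_range
  · intro x hx
    simp at hx ⊢
    omega
  · simp
  · simp
  · simp
  · intro x hx
    simp only [List.length_replicate] at hx
    rw [getD_replicate_true _ _ hx]
    simp [List.mem_range, hx]
  · exact linkN_range nums.length _ (fun x hx => getD_map_range _ none nums.length x hx)
  · exact linkP_range nums.length _ (fun x hx => getD_map_range _ none nums.length x hx)
  · rw [map_getD_range, bad_init]
  · exact foldl_insort_pairwise _ [] List.Pairwise.nil
  · intro pq hm
    obtain ⟨u, hu, hgu⟩ := List.mem_iff_getElem.mp hm
    rw [getElem_pairsL _ u hu] at hgu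
    simp only [List.getElem_range] at hgu
    have hu' : u < nums.length - 1 := by
      have := length_pairsL (List.range nums.length)
      simp at this
      omega
    rw [← hgu]
    refine (foldl_insort_mem _ _ []).mpr (Or.inr ?_)
    refine List.mem_map.mpr ⟨u, List.mem_range.mpr hu', ?_⟩
    rfl

-- ===== VERDICT (by name: the statement is the Claim_ definition above) =====
theorem minimumPairRemoval_naive_spec : Claim_equal_minimumPairRemoval_naive := by
  intro nums _
  unfold Spec_minimumPairRemoval_naive
  show minimumPairRemoval_naive nums = minimumPairRemoval_naive_alt nums
  rw [minimumPairRemoval_naive]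
  have halt : minimumPairRemoval_naive_alt nums
      = pvLoopH (3 * nums.length + 3) nums
          ((List.range nums.length).map (fun i => if i + 1 < nums.length then some (i + 1) else none))
          ((List.range nums.length).map (fun i => if i = 0 then none else some (i - 1)))
          (List.replicate nums.length true)
          (((List.range (nums.length - 1)).map
              (fun i => ((nums.getD i 0 + nums.getD (i + 1) 0, i, i + 1) : Int × Nat × Nat))).foldl
            (fun h e => pvInsort e h) [])
          (((List.range (nums.length - 1)).filter
              (fun i => decide (nums.getD i 0 > nums.getD (i + 1) 0))).length : Int)
          0 := rfl
  rw [halt]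
  rw [sim (3 * nums.length + 3) nums _ _ _ _ _ 0 (List.range nums.length) (nums.length + 1)
      (inv_init nums)
      (by rw [foldl_insort_length]; simp [List.length_map, List.length_range]; omega)
      (by simp; omega)]
  rw [map_getD_range]
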